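-- pv_equiv track=rewrite | github.com/festad/Artificial-Intelligence-NLP | encoder.py | get_term_frequency_vector
-- ===== SOURCE A (Python) =====
-- from typing import List, Dict
--
-- def get_term_frequency_vector(words: List[str], dictionary: Dict[str, int]) -> List[int]:
--     array_dictionary = [k for k in dictionary]
--     vector = [0 for _ in range(len(array_dictionary))]
--     map_wds = {}
--     for w in words:
--         if w in map_wds:
--             map_wds[w] += 1
--         else:
--             map_wds[w] = 1
--     for w in words:
--         if w in array_dictionary:
--             vector[array_dictionary.index(w)] = map_wds[w]
--     return vector
-- ===== SOURCE B (Python) =====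
-- from typing import List, Dict
--
-- def get_term_frequency_vector(words: List[str], dictionary: Dict[str, int]) -> List[int]:
--     return [words.count(k) for k in dictionary]
-- ===== Notes on version B (the rewrite author's own statement) =====
-- stated objective: simpler
-- what changed: Instead of tabulating word counts in an intermediate frequency map and assigning them positionally through a second pass with list.index, B iterates over the dictionary keys in order and counts each key's occurrences directly in words with a single comprehension.
import Mathlib
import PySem

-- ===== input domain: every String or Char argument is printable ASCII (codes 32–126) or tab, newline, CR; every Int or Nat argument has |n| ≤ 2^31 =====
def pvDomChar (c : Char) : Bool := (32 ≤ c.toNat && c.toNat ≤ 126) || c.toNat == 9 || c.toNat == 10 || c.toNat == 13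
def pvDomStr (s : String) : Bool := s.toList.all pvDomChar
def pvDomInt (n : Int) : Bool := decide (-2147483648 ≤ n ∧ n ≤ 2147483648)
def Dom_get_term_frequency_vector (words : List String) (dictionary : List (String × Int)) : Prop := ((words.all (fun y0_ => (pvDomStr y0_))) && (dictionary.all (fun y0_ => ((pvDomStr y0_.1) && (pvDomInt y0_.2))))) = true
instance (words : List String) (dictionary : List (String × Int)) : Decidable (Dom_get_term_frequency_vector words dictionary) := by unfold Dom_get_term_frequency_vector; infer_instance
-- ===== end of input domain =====

-- B replaces A's frequency map + positional second pass by counting each dictionary key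
-- directly in words (objective: simpler).

-- ===== PORT A =====
def get_term_frequency_vector (words : List String) (dictionary : List (String × Int)) : List Int :=
  -- array_dictionary = [k for k in dictionary]
  let array_dictionary := dictionary.map Prod.fst
  -- vector = [0 for _ in range(len(array_dictionary))]
  let vector : List Int := (List.range array_dictionary.length).map (fun _ => 0)
  -- map_wds = {}; for w in words: if w in map_wds: map_wds[w] += 1 else: map_wds[w] = 1
  let map_wds : PySem.Dict String Int :=
    words.foldl (fun d w => if d.contains w then d.modify w 0 (· + 1) else d.insert w 1)
      (PySem.Dict.mk [])
  -- for w in words: if w in array_dictionary: vector[array_dictionary.index(w)] = map_wds[w]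
  -- (map_wds[w] cannot raise: w ∈ words has been counted, so getD's default is never used)
  words.foldl (fun v w =>
    match PySem.List.index? array_dictionary w with
    | some i => v.set i (map_wds.getD w 0)
    | none => v) vector

-- ===== PORT B =====
def get_term_frequency_vector_alt (words : List String) (dictionary : List (String × Int)) : List Int :=
  -- return [words.count(k) for k in dictionary]
  dictionary.map (fun kv => (PySem.List.count words kv.1 : Int))

-- ===== PRECONDITION & SPEC =====
-- Pre_ only states the dict representation invariant: a Python dict always has distinct keys,
-- so association lists with duplicate keys represent no Python input at all.
def Pre_get_term_frequency_vector (words : List String) (dictionary : List (String × Int)) : Prop :=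
  (dictionary.map Prod.fst).Nodup
instance (words : List String) (dictionary : List (String × Int)) : Decidable (Pre_get_term_frequency_vector words dictionary) := by unfold Pre_get_term_frequency_vector; infer_instance

def pvWitness_get_term_frequency_vector : List String × (List (String × Int)) :=
  (["a", "b", "a"], [("a", 1), ("c", 2)])

def Spec_get_term_frequency_vector (words : List String) (dictionary : List (String × Int)) (out : List Int) : Prop := out = get_term_frequency_vector_alt words dictionary
instance (words : List String) (dictionary : List (String × Int)) (out : List Int) : Decidable (Spec_get_term_frequency_vector words dictionary out) := by unfold Spec_get_term_frequency_vector; infer_instance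

-- ===== CLAIM (what is proved, stated in full; the proofs are below) =====
def Claim_equal_get_term_frequency_vector : Prop := ∀ (words : List String) (dictionary : List (String × Int)), Dom_get_term_frequency_vector words dictionary → Pre_get_term_frequency_vector words dictionary → Spec_get_term_frequency_vector words dictionary (get_term_frequency_vector words dictionary)

-- ===== LEMMAS AND PROOFS =====

-- A's counting step is exactly the Counter step: on an absent key, insert-1 and modify-with-default-0
-- append the same entry.
theorem tfv_step_eq (d : PySem.Dict String Int) (w : String) :
    (if d.contains w then d.modify w 0 (· + 1) else d.insert w 1) = d.modify w 0 (· + 1) := by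
  by_cases h : d.contains w
  · simp [h]
  · simp only [h, if_neg, Bool.false_eq_true, not_false_eq_true, if_false]
    simp only [PySem.Dict.contains, Bool.not_eq_true, List.any_eq_false, beq_iff_eq] at h
    simp only [PySem.Dict.insert, PySem.Dict.modify, PySem.Dict.contains]
    have hany : (d.items.any fun p => p.1 == w) = false := by
      simp only [List.any_eq_false, beq_iff_eq]
      intro p hp; exact h p hp
    rw [if_neg (by simp [hany]), if_neg (by simp [hany])]
    have hg : d.getD w 0 = 0 := by
      simp only [PySem.Dict.getD, PySem.Dict.get?]
      cases hf : d.items.find? (fun p => p.1 == w) with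
      | none => rfl
      | some p =>
        have := List.find?_some hf
        have hm := List.mem_of_find?_eq_some hf
        simp only [beq_iff_eq] at this
        exact absurd this (h p hm)
    rw [hg]
    norm_num

-- A's frequency map holds exactly the word counts.
theorem tfv_getD_fold (ws : List String) (w : String) :
    ((ws.foldl (fun d w => if d.contains w then d.modify w 0 (· + 1) else d.insert w 1)
        (PySem.Dict.mk [] : PySem.Dict String Int)).getD w 0) = (ws.count w : Int) := by
  have hf : (ws.foldl (fun d w => if d.contains w then d.modify w 0 (· + 1) else d.insert w 1)
        (PySem.Dict.mk [] : PySem.Dict String Int)) =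
      ws.foldl (fun d x => d.modify x 0 (· + 1)) (PySem.Dict.mk [] : PySem.Dict String Int) := by
    congr 1
    funext d x
    exact tfv_step_eq d x
  rw [hf, PySem.Dict.getD_foldl_modify_add_one]
  simp [PySem.Dict.getD, PySem.Dict.get?]

-- In a duplicate-free key list, the first index of keys[j] is j.
theorem tfv_index?_getElem (l : List String) (h : l.Nodup) (j : Nat) (hj : j < l.length) :
    PySem.List.index? l l[j] = some j := by
  rw [PySem.List.index?_eq_idxOf?]
  have h1 := List.Nodup.idxOf_getElem h j hj
  rw [List.idxOf_eq_getD_idxOf?] at h1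
  cases he : l.idxOf? l[j] with
  | none => rw [he] at h1; simp at h1; omega
  | some k => rw [he] at h1; simp at h1; simp [h1]

-- The assignment loop preserves the vector's length.
theorem tfv_fold_length (keys : List String) (c : String → Int) (ws : List String) (v : List Int) :
    (ws.foldl (fun v w =>
      match PySem.List.index? keys w with
      | some i => v.set i (c w)
      | none => v) v).length = v.length := by
  induction ws generalizing v with
  | nil => rfl
  | cons w ws ih =>
    simp only [List.foldl_cons]
    rw [ih]
    cases PySem.List.index? keys w <;> simp

-- Elementwise description of the assignment loop: position j ends up holding c keys[j]
-- exactly when keys[j] occurs in the processed words, and is untouched otherwise.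
theorem tfv_fold_getElem? (keys : List String) (hnd : keys.Nodup) (c : String → Int)
    (ws : List String) (v : List Int) (hv : v.length = keys.length)
    (j : Nat) (hj : j < keys.length) :
    (ws.foldl (fun v w =>
      match PySem.List.index? keys w with
      | some i => v.set i (c w)
      | none => v) v)[j]? =
    if keys[j] ∈ ws then some (c keys[j]) else v[j]? := by
  induction ws generalizing v with
  | nil => simp
  | cons w ws ih =>
    simp only [List.foldl_cons]
    have hv' : (match PySem.List.index? keys w with
        | some i => v.set i (c w)
        | none => v).length = keys.length := by
      cases PySem.List.index? keys w <;> simp [hv]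
    rw [ih _ hv']
    by_cases hmem : keys[j] ∈ ws
    · simp [hmem]
    · simp only [hmem, if_false, List.mem_cons]
      by_cases hw : w = keys[j]
      · subst hw
        rw [tfv_index?_getElem keys hnd j hj]
        have hjv : j < v.length := hv ▸ hj
        simp [List.getElem?_set, hjv]
      · have hne : ¬ keys[j] = w := fun h => hw h.symm
        rw [if_neg (by simp [hne, hmem])]
        cases he : PySem.List.index? keys w with
        | none => rfl
        | some i =>
          obtain ⟨hi, hki, -⟩ := PySem.List.getElem_of_index?_eq_some he
          have hij : i ≠ j := by
            intro h; subst h; exact hw hki.symm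
          simp [List.getElem?_set_ne hij]

-- ===== VERDICT (by name: the statement is the Claim_ definition above) =====
theorem get_term_frequency_vector_spec : Claim_equal_get_term_frequency_vector := by
  intro words dictionary _dom pre
  unfold Spec_get_term_frequency_vector get_term_frequency_vector get_term_frequency_vector_alt
  simp only []
  apply List.ext_getElem?
  intro j
  have hlen0 : ((List.range (dictionary.map Prod.fst).length).map
      (fun _ => (0 : Int))).length = (dictionary.map Prod.fst).length := by simp
  by_cases hj : j < dictionary.length
  · have hjk : j < (dictionary.map Prod.fst).length := by simpa using hj
    rw [tfv_fold_getElem? (dictionary.map Prod.fst) pre _ words _ hlen0 j hjk]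
    have hkey : (dictionary.map Prod.fst)[j] = dictionary[j].1 := by simp
    conv_rhs => rw [List.getElem?_map, List.getElem?_eq_getElem hj]
    simp only [Option.map_some]
    by_cases hmem : (dictionary.map Prod.fst)[j] ∈ words
    · rw [if_pos hmem, tfv_getD_fold, hkey]
      simp [PySem.List.count_eq]
    · rw [if_neg hmem]
      have hc : words.count dictionary[j].1 = 0 := by
        rw [List.count_eq_zero]
        rw [hkey] at hmem; exact hmem
      rw [List.getElem?_map, List.getElem?_eq_getElem (by simpa using hj)]
      simp [hc]
  · have hj' : dictionary.length ≤ j := by omega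
    rw [List.getElem?_eq_none (by rw [tfv_fold_length]; simpa using hj'),
        List.getElem?_eq_none (by simpa using hj')]
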